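-- pv_equiv track=rewrite | github.com/keeb/media-management-service | mediaservice/parse.py | parse_anime
-- ===== SOURCE A (Python) =====
-- def is_resolution(part: str) -> bool:
--     """Check if string contains resolution marker."""
--     resolutions = ["1080p", "720p", "480p", "2160p", "4k", "uhd"]
--     # Remove brackets if present
--     clean_part = part.strip("[]()").lower()
--     return any(res.lower() in clean_part for res in resolutions)
--
-- def parse_anime(filename: str) -> dict:
--     """Parse anime filename into components."""
--     show_info = {
--         "name": "",
--         "season": None,
--         "episode": None,
--         "release_team": None,
--         "resolution": None,
--         "checksum": None
--     }
--
--     parts = filename.split(" ")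
--     index = 0
--
--     for part in parts:
--         if part.startswith('['):
--             if not show_info["release_team"]:
--                 show_info["release_team"] = part[1:-1]
--             else:
--                 if "." in part:
--                     c = part.split(".")[0]
--                     show_info["checksum"] = c[1:-1]
--                 else:
--                     show_info["checksum"] = part[1:-1]
--
--         if part.isdigit():
--             show_info["name"] = " ".join(parts[1:index]).strip()
--             show_info["episode"] = part
--
--         if is_resolution(part):
--             show_info["resolution"] = part.strip('()')
--
--         index += 1
--
--     return show_info
-- ===== SOURCE B (Python) =====
-- def is_resolution(part: str) -> bool:
--     """Check if string contains resolution marker."""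
--     resolutions = ["1080p", "720p", "480p", "2160p", "4k", "uhd"]
--     clean_part = part.strip("[]()").lower()
--     return any(res.lower() in clean_part for res in resolutions)
--
-- def parse_anime(filename: str) -> dict:
--     """Parse anime filename into components, one independent pass per field group."""
--     parts = filename.split(" ")
--
--     # Bracket parts drive release_team / checksum.
--     release_team = None
--     checksum = None
--     for p in [q for q in parts if q.startswith('[')]:
--         if not release_team:
--             release_team = p[1:-1]
--         elif "." in p:
--             checksum = p.split(".")[0][1:-1]
--         else:
--             checksum = p[1:-1]
--
--     # Last digit part (scanning from the right) fixes episode and name.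
--     name, episode = "", None
--     for i in range(len(parts) - 1, -1, -1):
--         if parts[i].isdigit():
--             episode = parts[i]
--             name = " ".join(parts[1:i]).strip()
--             break
--
--     # Last resolution-looking part fixes resolution.
--     resolution = None
--     for p in reversed(parts):
--         if is_resolution(p):
--             resolution = p.strip('()')
--             break
--
--     return {"name": name, "season": None, "episode": episode,
--             "release_team": release_team, "resolution": resolution,
--             "checksum": checksum}
-- ===== Notes on version B (the rewrite author's own statement) =====
-- stated objective: alternative
-- what changed: Replaced A's single fused indexed loop that mutates a dict with three independent passes: a forward fold over only the bracket parts for release_team/checksum, a right-to-left scan with early break for the last digit part (episode/name, join computed once instead of at every digit part), and a right-to-left scan with early break for the last resolution part.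
import Mathlib
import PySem

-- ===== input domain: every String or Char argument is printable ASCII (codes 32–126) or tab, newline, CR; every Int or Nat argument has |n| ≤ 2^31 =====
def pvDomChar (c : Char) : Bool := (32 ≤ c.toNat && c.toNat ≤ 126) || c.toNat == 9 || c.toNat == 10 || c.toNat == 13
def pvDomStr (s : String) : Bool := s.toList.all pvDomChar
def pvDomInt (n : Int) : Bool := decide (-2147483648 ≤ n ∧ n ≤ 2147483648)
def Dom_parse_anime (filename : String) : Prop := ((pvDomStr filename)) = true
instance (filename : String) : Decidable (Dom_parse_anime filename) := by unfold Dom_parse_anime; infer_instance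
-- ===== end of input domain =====

-- B replaces A's fused indexed loop over a mutated dict with three independent passes
-- (bracket parts forward; last digit part and last resolution part by scanning from the right
-- with early exit); objective: alternative decomposition, same cost.

-- ===== PORT A =====
-- shared module helper (same in both Pythons)
def is_resolution (part : String) : Bool :=
  let resolutions := ["1080p", "720p", "480p", "2160p", "4k", "uhd"]
  let clean_part := PySem.Str.lower (PySem.Str.stripChars part "[]()")
  resolutions.any (fun res => PySem.Str.isIn (PySem.Str.lower res) clean_part)

-- Python truthiness of an Optional[str] value: None and "" are falsy
def pyFalsy (v : Option String) : Bool :=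
  match v with
  | none => true
  | some s => s.toList.isEmpty

-- the body of A's `for part in parts` loop (state: the dict and `index`)
def parse_anime_step (parts : List String)
    (st : PySem.Dict String (Option String) × Int) (part : String) :
    PySem.Dict String (Option String) × Int :=
  let d := st.1
  let index := st.2
  let d :=
    if PySem.Str.startswith part "[" then
      if pyFalsy (d.getD "release_team" none) then
        d.insert "release_team" (some (PySem.Str.slice part (some 1) (some (-1))))
      else
        if PySem.Str.isIn "." part then
          -- part.split(".")[0]: split with a nonempty separator never returns an empty list
          let c := ((PySem.Str.split? part ".").getD []).headD ""
          d.insert "checksum" (some (PySem.Str.slice c (some 1) (some (-1))))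
        else
          d.insert "checksum" (some (PySem.Str.slice part (some 1) (some (-1))))
    else d
  let d :=
    if PySem.Str.strIsdigit part then
      (d.insert "name" (some (PySem.Str.strip (PySem.Str.join " "
          (PySem.List.slice parts (some 1) (some index)))))).insert "episode" (some part)
    else d
  let d :=
    if is_resolution part then
      d.insert "resolution" (some (PySem.Str.stripChars part "()"))
    else d
  (d, index + 1)

def parse_anime (filename : String) : List (String × Option String) :=
  let show_info : PySem.Dict String (Option String) :=
    PySem.Dict.ofList [("name", some ""), ("season", none), ("episode", none),
      ("release_team", none), ("resolution", none), ("checksum", none)]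
  -- filename.split(" "): separator nonempty, split? never returns none
  let parts := (PySem.Str.split? filename " ").getD []
  let res := parts.foldl (parse_anime_step parts) (show_info, 0)
  res.1.items

-- ===== PORT B =====
-- body of B's loop over the bracket parts (state: (release_team, checksum))
def alt_bracket_step (tc : Option String × Option String) (p : String) :
    Option String × Option String :=
  if pyFalsy tc.1 then
    (some (PySem.Str.slice p (some 1) (some (-1))), tc.2)
  else
    if PySem.Str.isIn "." p then
      (tc.1, some (PySem.Str.slice (((PySem.Str.split? p ".").getD []).headD "")
        (some 1) (some (-1))))
    else
      (tc.1, some (PySem.Str.slice p (some 1) (some (-1))))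

-- B's right-to-left scan for the last digit part (break = return); input is the
-- reversed enumeration of parts
def alt_episode (parts : List String) : List (Int × String) → String × Option String
  | [] => ("", none)
  | (i, p) :: rest =>
      if PySem.Str.strIsdigit p then
        (PySem.Str.strip (PySem.Str.join " " (PySem.List.slice parts (some 1) (some i))),
         some p)
      else alt_episode parts rest

-- B's right-to-left scan for the last resolution part
def alt_resolution : List String → Option String
  | [] => none
  | p :: rest =>
      if is_resolution p then some (PySem.Str.stripChars p "()") else alt_resolution rest

def parse_anime_alt (filename : String) : List (String × Option String) :=
  let parts := (PySem.Str.split? filename " ").getD []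
  let tc := (parts.filter (fun q => PySem.Str.startswith q "[")).foldl
    alt_bracket_step (none, none)
  let ne := alt_episode parts (PySem.List.enumerate parts 0).reverse
  let r := alt_resolution parts.reverse
  [("name", some ne.1), ("season", none), ("episode", ne.2),
   ("release_team", tc.1), ("resolution", r), ("checksum", tc.2)]

-- ===== PRECONDITION & SPEC =====
def Spec_parse_anime (filename : String) (out : List (String × Option String)) : Prop := out = parse_anime_alt filename
instance (filename : String) (out : List (String × Option String)) : Decidable (Spec_parse_anime filename out) := by unfold Spec_parse_anime; infer_instance

-- ===== CLAIM (what is proved, stated in full; the proofs are below) =====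
def Claim_equal_parse_anime : Prop := ∀ (filename : String), Dom_parse_anime filename → Spec_parse_anime filename (parse_anime filename)

-- ===== LEMMAS AND PROOFS =====

-- the five fields A's dict carries, as a plain tuple state
structure PAState where
  n : String
  e : Option String
  t : Option String
  r : Option String
  c : Option String

def mkD (s : PAState) : PySem.Dict String (Option String) :=
  PySem.Dict.mk [("name", some s.n), ("season", none), ("episode", s.e),
    ("release_team", s.t), ("resolution", s.r), ("checksum", s.c)]

def nameAt (parts : List String) (i : Int) : String :=
  PySem.Str.strip (PySem.Str.join " " (PySem.List.slice parts (some 1) (some i)))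

-- A's loop body, expressed on the tuple state
def tupStep (parts : List String) (s : PAState) (i : Int) (p : String) : PAState :=
  let tc := if PySem.Str.startswith p "[" then alt_bracket_step (s.t, s.c) p else (s.t, s.c)
  let ne := if PySem.Str.strIsdigit p then (nameAt parts i, some p) else (s.n, s.e)
  let r := if is_resolution p then some (PySem.Str.stripChars p "()") else s.r
  ⟨ne.1, ne.2, tc.1, r, tc.2⟩

lemma mkD_getD_rt (s : PAState) : (mkD s).getD "release_team" none = s.t := rfl

lemma step_eq (parts : List String) (s : PAState) (i : Int) (p : String) :
    parse_anime_step parts (mkD s, i) p = (mkD (tupStep parts s i p), i + 1) := by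
  unfold parse_anime_step tupStep alt_bracket_step
  dsimp only
  simp only [mkD_getD_rt]
  split_ifs <;> rfl

-- the fused fold splits into three independent folds, one per field group
lemma fold_split (parts : List String) :
    ∀ (l : List String) (s : PAState) (i : Int),
      l.foldl (parse_anime_step parts) (mkD s, i) =
        (mkD ⟨((PySem.List.enumerate l i).foldl
                 (fun ne ip => if PySem.Str.strIsdigit ip.2 then (nameAt parts ip.1, some ip.2) else ne)
                 (s.n, s.e)).1,
              ((PySem.List.enumerate l i).foldl
                 (fun ne ip => if PySem.Str.strIsdigit ip.2 then (nameAt parts ip.1, some ip.2) else ne)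
                 (s.n, s.e)).2,
              ((l.filter (fun q => PySem.Str.startswith q "[")).foldl alt_bracket_step (s.t, s.c)).1,
              l.foldl (fun r p => if is_resolution p then some (PySem.Str.stripChars p "()") else r) s.r,
              ((l.filter (fun q => PySem.Str.startswith q "[")).foldl alt_bracket_step (s.t, s.c)).2⟩,
         i + l.length) := by
  intro l
  induction l with
  | nil => intro s i; simp [PySem.List.enumerate_nil]
  | cons p rest ih =>
      intro s i
      rw [List.foldl_cons, step_eq, ih]
      have harith : i + 1 + (rest.length : Int) = i + (((p :: rest).length : Nat) : Int) := by
        push_cast [List.length_cons]; ring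
      rw [harith]
      simp only [PySem.List.enumerate_cons, List.foldl_cons, List.filter_cons, tupStep]
      by_cases h1 : PySem.Chars.startswith p.toList ['['] <;>
      by_cases h2 : PySem.Chars.strIsdigit p.toList <;>
        simp [h1, h2]

-- a last-wins fold is the first match of the reversed list
lemma foldl_lastwins {α β : Type} (cond : α → Bool) (g : α → β) :
    ∀ (l : List α) (s : β),
      l.foldl (fun s x => if cond x then g x else s) s =
        (match l.reverse.find? cond with
         | some x => g x
         | none => s) := by
  intro l
  induction l with
  | nil => intro s; simp
  | cons x rest ih =>
      intro s
      rw [List.foldl_cons, ih]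
      simp only [List.reverse_cons, List.find?_append]
      cases hf : rest.reverse.find? cond with
      | some y => simp
      | none =>
          simp only [Option.none_or]
          by_cases hx : cond x <;> simp [List.find?, hx]

lemma alt_episode_eq (parts : List String) :
    ∀ (l : List (Int × String)),
      alt_episode parts l =
        (match l.find? (fun ip => PySem.Str.strIsdigit ip.2) with
         | some ip => (nameAt parts ip.1, some ip.2)
         | none => ("", none)) := by
  intro l
  induction l with
  | nil => rfl
  | cons ip rest ih =>
      obtain ⟨i, p⟩ := ip
      show (if PySem.Str.strIsdigit p then _ else alt_episode parts rest) = _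
      by_cases h : PySem.Str.strIsdigit p
      · rw [if_pos h, List.find?_cons_of_pos (by simpa using h)]
        rfl
      · rw [if_neg h, List.find?_cons_of_neg (by simpa using h), ih]

lemma alt_resolution_eq :
    ∀ (l : List String),
      alt_resolution l =
        (match l.find? is_resolution with
         | some p => some (PySem.Str.stripChars p "()")
         | none => none) := by
  intro l
  induction l with
  | nil => rfl
  | cons p rest ih =>
      show (if is_resolution p then _ else alt_resolution rest) = _
      by_cases h : is_resolution p
      · rw [if_pos h, List.find?_cons_of_pos h]
      · rw [if_neg h, List.find?_cons_of_neg (by simpa using h), ih]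

-- ===== VERDICT (by name: the statement is the Claim_ definition above) =====
theorem parse_anime_spec : Claim_equal_parse_anime := by
  intro filename _
  unfold Spec_parse_anime parse_anime parse_anime_alt
  dsimp only
  generalize (PySem.Str.split? filename " ").getD [] = parts
  have hinit : PySem.Dict.ofList
      [("name", some ""), ("season", (none : Option String)), ("episode", none),
       ("release_team", none), ("resolution", none), ("checksum", none)] =
      mkD ⟨"", none, none, none, none⟩ := rfl
  rw [hinit, fold_split parts parts ⟨"", none, none, none, none⟩ 0]
  rw [foldl_lastwins (fun ip => PySem.Str.strIsdigit ip.2)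
        (fun ip => (nameAt parts ip.1, some ip.2)) (PySem.List.enumerate parts 0) ("", none)]
  rw [foldl_lastwins is_resolution
        (fun p => some (PySem.Str.stripChars p "()")) parts (none : Option String)]
  rw [alt_episode_eq, alt_resolution_eq]
  cases hd : (PySem.List.enumerate parts 0).reverse.find? (fun ip => PySem.Str.strIsdigit ip.2) <;>
  cases hr : parts.reverse.find? is_resolution <;>
  simp [mkD, nameAt]
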